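-- pv_equiv track=rewrite | github.com/mismayil/morph-gen | src/morphology.py | infinitive_tr
-- ===== SOURCE A (Python) =====
-- def infinitive_tr(verb):
--     hard_vowels = ["a", "o", "u"]
--     soft_vowels = ["e", "i"]
--
--     for char in verb[::-1]:
--         if char in hard_vowels:
--             return f"{verb}mak"
--         if char in soft_vowels:
--             return f"{verb}mek"
-- ===== SOURCE B (Python) =====
-- def infinitive_tr(verb):
--     suffix_of = {"a": "mak", "o": "mak", "u": "mak", "e": "mek", "i": "mek"}
--     last_suffix = None
--     for char in verb:
--         suffix = suffix_of.get(char)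
--         if suffix is not None:
--             last_suffix = suffix
--     if last_suffix is None:
--         return None
--     return verb + last_suffix
-- ===== Notes on version B (the rewrite author's own statement) =====
-- stated objective: alternative
-- what changed: B replaces A's reversed scan with early return by a forward full pass over the string that keeps a last-vowel-wins accumulator driven by a vowel-to-suffix dict, instead of two list membership tests.
import Mathlib
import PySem

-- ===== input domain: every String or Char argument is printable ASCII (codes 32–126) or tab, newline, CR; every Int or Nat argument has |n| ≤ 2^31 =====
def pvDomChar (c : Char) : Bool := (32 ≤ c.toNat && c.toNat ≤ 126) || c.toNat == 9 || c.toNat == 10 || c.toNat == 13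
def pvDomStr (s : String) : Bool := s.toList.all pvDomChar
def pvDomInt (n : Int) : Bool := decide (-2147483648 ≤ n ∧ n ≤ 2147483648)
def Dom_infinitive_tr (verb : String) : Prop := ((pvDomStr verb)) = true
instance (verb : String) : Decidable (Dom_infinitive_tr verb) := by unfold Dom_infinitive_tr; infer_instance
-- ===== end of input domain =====

-- B replaces A's reversed scan with early return by a forward full pass keeping a
-- last-vowel-wins accumulator driven by a vowel→suffix dict (alternative decomposition, same cost).

-- ===== PORT A =====
-- for char in verb[::-1]: first vowel found decides; falls through to None.
def infinitive_tr_go (verb : String) : List Char → Option String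
  | [] => none
  | c :: rest =>
      if c ∈ ['a', 'o', 'u'] then some (verb ++ "mak")
      else if c ∈ ['e', 'i'] then some (verb ++ "mek")
      else infinitive_tr_go verb rest

def infinitive_tr (verb : String) : Option String :=
  infinitive_tr_go verb verb.toList.reverse

-- ===== PORT B =====
def suffix_of : PySem.Dict Char String :=
  PySem.Dict.ofList [('a', "mak"), ('o', "mak"), ('u', "mak"), ('e', "mek"), ('i', "mek")]

def infinitive_tr_alt (verb : String) : Option String :=
  match verb.toList.foldl
      (fun last_suffix char =>
        match suffix_of.get? char with
        | some suffix => some suffix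
        | none => last_suffix)
      none with
  | none => none
  | some s => some (verb ++ s)

-- ===== PRECONDITION & SPEC =====
def Spec_infinitive_tr (verb : String) (out : Option String) : Prop := out = infinitive_tr_alt verb
instance (verb : String) (out : Option String) : Decidable (Spec_infinitive_tr verb out) := by unfold Spec_infinitive_tr; infer_instance

-- ===== CLAIM (what is proved, stated in full; the proofs are below) =====
def Claim_equal_infinitive_tr : Prop := ∀ (verb : String), Dom_infinitive_tr verb → Spec_infinitive_tr verb (infinitive_tr verb)


-- ===== LEMMAS AND PROOFS =====

-- suffix contributed by one character (proof helper)
def vowelSuf (c : Char) : Option String :=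
  if c ∈ ['a', 'o', 'u'] then some "mak"
  else if c ∈ ['e', 'i'] then some "mek"
  else none

-- first vowel suffix in a character list (characterises A's early-exit scan)
def firstSuf : List Char → Option String
  | [] => none
  | c :: rest =>
      match vowelSuf c with
      | some s => some s
      | none => firstSuf rest

lemma get?_eq_vowelSuf (c : Char) : suffix_of.get? c = vowelSuf c := by
  by_cases h1 : c = 'a'; · subst h1; rfl
  by_cases h2 : c = 'o'; · subst h2; rfl
  by_cases h3 : c = 'u'; · subst h3; rfl
  by_cases h4 : c = 'e'; · subst h4; rfl
  by_cases h5 : c = 'i'; · subst h5; rfl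
  have hmk : suffix_of = PySem.Dict.mk [('a', "mak"), ('o', "mak"), ('u', "mak"), ('e', "mek"), ('i', "mek")] := by decide
  simp only [hmk, PySem.Dict.get?_mk_cons,
    beq_eq_false_iff_ne.mpr (Ne.symm h1), beq_eq_false_iff_ne.mpr (Ne.symm h2),
    beq_eq_false_iff_ne.mpr (Ne.symm h3), beq_eq_false_iff_ne.mpr (Ne.symm h4),
    beq_eq_false_iff_ne.mpr (Ne.symm h5), if_false, Bool.false_eq_true]
  simp [PySem.Dict.get?, vowelSuf, h1, h2, h3, h4, h5]

lemma goA_eq_firstSuf (verb : String) (l : List Char) :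
    infinitive_tr_go verb l = (firstSuf l).map (fun s => verb ++ s) := by
  induction l with
  | nil => rfl
  | cons c l ih =>
      simp only [infinitive_tr_go, firstSuf, vowelSuf]
      split_ifs <;> simp [ih]

lemma firstSuf_append (xs : List Char) (c : Char) :
    firstSuf (xs ++ [c]) =
      (match firstSuf xs with
        | some s => some s
        | none => vowelSuf c) := by
  induction xs with
  | nil => simp [firstSuf]; cases vowelSuf c <;> rfl
  | cons x xs ih =>
      simp only [List.cons_append, firstSuf, ih]
      cases vowelSuf x <;> rfl

lemma foldl_eq_firstSuf (l : List Char) :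
    ∀ init, l.foldl
        (fun last_suffix char =>
          match suffix_of.get? char with
          | some suffix => some suffix
          | none => last_suffix)
        init =
      (match firstSuf l.reverse with
        | some s => some s
        | none => init) := by
  induction l with
  | nil => intro init; rfl
  | cons c l ih =>
      intro init
      simp only [List.foldl_cons]
      rw [ih, List.reverse_cons, firstSuf_append, get?_eq_vowelSuf]
      cases firstSuf l.reverse <;> cases vowelSuf c <;> rfl

-- ===== VERDICT (by name: the statement is the Claim_ definition above) =====
theorem infinitive_tr_spec : Claim_equal_infinitive_tr := by
  intro verb _
  unfold Spec_infinitive_tr infinitive_tr infinitive_tr_alt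
  rw [foldl_eq_firstSuf, goA_eq_firstSuf]
  cases firstSuf verb.toList.reverse <;> rfl
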